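-- pv_equiv track=rewrite | github.com/CSA86/CSA86 | Configuracion voz.py | analiza_puertos
-- ===== SOURCE A (Python) =====
-- def analiza_puertos(informacion):
--     respuesta = {}
--     for orden, caso in enumerate(informacion):
--         caracteristicas_del_puerto = []
--         if "port" in caso:
--             port = caso.split()[-1].strip()
--             fin_del_caso = False
--             next = orden
--             while not fin_del_caso:
--                 if next + 1 >= len(informacion) or "port" in informacion[next + 1]:
--                     fin_del_caso = True
--                 else:
--                     next += 1
--                     if "ethernet" not in informacion[next] and "exit" not in informacion[next]:
--                         caracteristicas_del_puerto.append(informacion[next].strip())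
--                         if 'no shutdown' in caracteristicas_del_puerto:
--                             respuesta.update({port: caracteristicas_del_puerto})
--     return respuesta
-- ===== SOURCE B (Python) =====
-- def analiza_puertos(informacion):
--     respuesta = {}
--     puerto = None
--     caracteristicas = []
--     for caso in informacion:
--         if "port" in caso:
--             if puerto is not None and "no shutdown" in caracteristicas:
--                 respuesta[puerto] = caracteristicas
--             puerto = caso.split()[-1].strip()
--             caracteristicas = []
--         elif puerto is not None and "ethernet" not in caso and "exit" not in caso:
--             caracteristicas.append(caso.strip())
--     if puerto is not None and "no shutdown" in caracteristicas:
--         respuesta[puerto] = caracteristicas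
--     return respuesta
-- ===== Notes on version B (the rewrite author's own statement) =====
-- stated objective: simpler
-- what changed: Replaces A's per-port-line rescan (outer enumerate loop plus an inner index-walking while over the following lines, with repeated dict updates as the list grows) by a single linear pass that carries the current port and its characteristics list and flushes the group once when the next port line or the end is reached.
import Mathlib
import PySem

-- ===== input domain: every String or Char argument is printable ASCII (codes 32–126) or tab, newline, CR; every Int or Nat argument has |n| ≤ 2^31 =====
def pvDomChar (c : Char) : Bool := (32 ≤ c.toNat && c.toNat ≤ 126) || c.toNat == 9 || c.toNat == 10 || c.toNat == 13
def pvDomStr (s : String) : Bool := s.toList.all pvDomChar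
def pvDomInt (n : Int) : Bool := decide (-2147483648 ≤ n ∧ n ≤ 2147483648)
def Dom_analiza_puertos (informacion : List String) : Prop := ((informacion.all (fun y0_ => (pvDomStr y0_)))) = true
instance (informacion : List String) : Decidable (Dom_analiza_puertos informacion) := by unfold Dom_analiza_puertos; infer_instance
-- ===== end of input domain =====

-- B replaces A's outer-enumerate-plus-inner-while rescan by one linear pass carrying the
-- current port and its characteristics list (same return value).


-- ===== PORT A =====
-- caso.split()[-1].strip(); the pyGet? cannot be none ("port" in caso forces a nonempty split), getD "" totalizes
def pvPortName (caso : String) : String :=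
  PySem.Str.strip ((PySem.List.pyGet? (PySem.Str.split₀ caso) (-1)).getD "")

-- the inner 'while not fin_del_caso' loop of A, walking index `next` forward
def pvInnerA (info : List String) (port : String) (next : Nat) (feats : List String)
    (resp : PySem.Dict String (List String)) : PySem.Dict String (List String) :=
  if info.length ≤ next + 1 ∨ PySem.Str.isIn "port" (info.getD (next + 1) "") then resp
  else
    if (!PySem.Str.isIn "ethernet" (info.getD (next + 1) "")) &&
       (!PySem.Str.isIn "exit" (info.getD (next + 1) "")) then
      pvInnerA info port (next + 1) (feats ++ [PySem.Str.strip (info.getD (next + 1) "")])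
        (if "no shutdown" ∈ feats ++ [PySem.Str.strip (info.getD (next + 1) "")] then
           resp.insert port (feats ++ [PySem.Str.strip (info.getD (next + 1) "")])
         else resp)
    else
      pvInnerA info port (next + 1) feats resp
termination_by info.length - next
decreasing_by all_goals omega

def analiza_puertos (informacion : List String) : List (String × List String) :=
  ((PySem.List.enumerate informacion 0).foldl
    (fun resp p =>
      if PySem.Str.isIn "port" p.2 then
        pvInnerA informacion (pvPortName p.2) p.1.toNat [] resp
      else resp)
    PySem.Dict.empty).items

-- ===== PORT B =====
-- flush the pending group: record it iff it contains 'no shutdown'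
def pvFlushB (resp : PySem.Dict String (List String)) :
    Option (String × List String) → PySem.Dict String (List String)
  | none => resp
  | some (p, fs) => if "no shutdown" ∈ fs then resp.insert p fs else resp

def pvStepB (st : PySem.Dict String (List String) × Option (String × List String))
    (caso : String) : PySem.Dict String (List String) × Option (String × List String) :=
  if PySem.Str.isIn "port" caso then
    (pvFlushB st.1 st.2, some (pvPortName caso, []))
  else
    match st.2 with
    | none => st
    | some (p, fs) =>
      if (!PySem.Str.isIn "ethernet" caso) && (!PySem.Str.isIn "exit" caso) then
        (st.1, some (p, fs ++ [PySem.Str.strip caso]))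
      else st

def analiza_puertos_alt (informacion : List String) : List (String × List String) :=
  (pvFlushB (informacion.foldl pvStepB (PySem.Dict.empty, none)).1
            (informacion.foldl pvStepB (PySem.Dict.empty, none)).2).items

-- ===== PRECONDITION & SPEC =====
def Spec_analiza_puertos (informacion : List String) (out : List (String × List String)) : Prop := out = analiza_puertos_alt informacion
instance (informacion : List String) (out : List (String × List String)) : Decidable (Spec_analiza_puertos informacion out) := by unfold Spec_analiza_puertos; infer_instance

-- ===== CLAIM (what is proved, stated in full; the proofs are below) =====
def Claim_equal_analiza_puertos : Prop := ∀ (informacion : List String), Dom_analiza_puertos informacion → Spec_analiza_puertos informacion (analiza_puertos informacion)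

-- ===== LEMMAS AND PROOFS =====

-- the stripped, filtered lines of the block following a port line
def pvCollect (xs : List String) : List String :=
  (xs.takeWhile (fun x => !PySem.Str.isIn "port" x)).filterMap
    (fun x => if (!PySem.Str.isIn "ethernet" x) && (!PySem.Str.isIn "exit" x)
              then some (PySem.Str.strip x) else none)

-- net effect of A's incremental 'respuesta.update' chain for one block
def pvUpd (resp : PySem.Dict String (List String)) (p : String) (fs : List String) :
    PySem.Dict String (List String) :=
  if "no shutdown" ∈ fs then resp.insert p fs else resp

-- common reference walk: at each port line, fold in the whole following block
def pvGo (resp : PySem.Dict String (List String)) :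
    List String → PySem.Dict String (List String)
  | [] => resp
  | x :: xs =>
      pvGo (if PySem.Str.isIn "port" x then pvUpd resp (pvPortName x) (pvCollect xs) else resp) xs

theorem pvGo_cons (resp : PySem.Dict String (List String)) (x : String) (xs : List String) :
    pvGo resp (x :: xs) =
      pvGo (if PySem.Str.isIn "port" x then pvUpd resp (pvPortName x) (pvCollect xs) else resp)
        xs := rfl

theorem pvCollect_cons_port {x : String} (xs : List String)
    (h : PySem.Str.isIn "port" x = true) : pvCollect (x :: xs) = [] := by
  unfold pvCollect
  rw [List.takeWhile_cons, if_neg (by rw [h]; decide)]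
  rfl

theorem pvCollect_cons_keep {x : String} (xs : List String)
    (h : PySem.Str.isIn "port" x = false)
    (hk : ((!PySem.Str.isIn "ethernet" x) && (!PySem.Str.isIn "exit" x)) = true) :
    pvCollect (x :: xs) = PySem.Str.strip x :: pvCollect xs := by
  unfold pvCollect
  rw [List.takeWhile_cons, if_pos (by rw [h]; rfl), List.filterMap_cons, if_pos hk]

theorem pvCollect_cons_skip {x : String} (xs : List String)
    (h : PySem.Str.isIn "port" x = false)
    (hk : ((!PySem.Str.isIn "ethernet" x) && (!PySem.Str.isIn "exit" x)) = false) :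
    pvCollect (x :: xs) = pvCollect xs := by
  unfold pvCollect
  rw [List.takeWhile_cons, if_pos (by rw [h]; rfl), List.filterMap_cons, if_neg (by rw [hk]; decide)]

theorem pvUpd_absorb (resp : PySem.Dict String (List String)) (p : String)
    (F c : List String) : pvUpd (pvUpd resp p F) p (F ++ c) = pvUpd resp p (F ++ c) := by
  unfold pvUpd
  by_cases h2 : ("no shutdown" : String) ∈ F ++ c
  · by_cases h1 : "no shutdown" ∈ F <;> simp [h1, h2, PySem.Dict.insert_insert_self]
  · have h1 : "no shutdown" ∉ F := fun hm => h2 (List.mem_append_left _ hm)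
    simp [h1, h2]

theorem pvInnerA_spec (info : List String) (port : String) :
    ∀ (next : Nat) (feats : List String) (resp : PySem.Dict String (List String)),
    pvInnerA info port next feats resp =
      if pvCollect (info.drop (next + 1)) = [] then resp
      else pvUpd resp port (feats ++ pvCollect (info.drop (next + 1))) := by
  intro next feats resp
  fun_induction pvInnerA info port next feats resp with
  | case1 next feats resp h =>
      by_cases hl : info.length ≤ next + 1
      · simp [List.drop_eq_nil_of_le hl, pvCollect]
      · have hlt : next + 1 < info.length := by omega
        have hp : PySem.Str.isIn "port" (info.getD (next + 1) "") = true := by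
          rcases h with h | h
          · omega
          · exact h
        rw [List.getD_eq_getElem info "" hlt] at hp
        rw [List.drop_eq_getElem_cons hlt, pvCollect_cons_port _ hp]
        simp
  | case2 next feats resp h hk ih =>
      have hlt : next + 1 < info.length := by omega
      have hp : PySem.Str.isIn "port" (info.getD (next + 1) "") = false :=
        Bool.eq_false_iff.mpr (fun hb => h (Or.inr hb))
      simp only [dite_eq_ite] at ih
      rw [ih]
      rw [List.getD_eq_getElem info "" hlt] at hp hk ⊢
      rw [List.drop_eq_getElem_cons hlt, pvCollect_cons_keep _ hp hk,
        if_neg (List.cons_ne_nil _ _)]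
      by_cases hc : pvCollect (info.drop (next + 1 + 1)) = []
      · rw [if_pos hc, hc]
        simp [pvUpd]
      · rw [if_neg hc]
        have hR : (if "no shutdown" ∈ feats ++ [PySem.Str.strip info[next + 1]] then
              resp.insert port (feats ++ [PySem.Str.strip info[next + 1]]) else resp)
            = pvUpd resp port (feats ++ [PySem.Str.strip info[next + 1]]) := rfl
        rw [hR, pvUpd_absorb]
        simp
  | case3 next feats resp h hk ih =>
      have hlt : next + 1 < info.length := by omega
      have hp : PySem.Str.isIn "port" (info.getD (next + 1) "") = false :=
        Bool.eq_false_iff.mpr (fun hb => h (Or.inr hb))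
      have hk' : ((!PySem.Str.isIn "ethernet" (info.getD (next + 1) "")) &&
          (!PySem.Str.isIn "exit" (info.getD (next + 1) ""))) = false :=
        Bool.eq_false_iff.mpr hk
      rw [ih]
      rw [List.getD_eq_getElem info "" hlt] at hp hk'
      rw [List.drop_eq_getElem_cons hlt, pvCollect_cons_skip _ hp hk']

theorem pvInnerA_nil_spec (info : List String) (port : String) (next : Nat)
    (resp : PySem.Dict String (List String)) :
    pvInnerA info port next [] resp = pvUpd resp port (pvCollect (info.drop (next + 1))) := by
  rw [pvInnerA_spec]
  by_cases hc : pvCollect (info.drop (next + 1)) = [] <;> simp [hc, pvUpd]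

theorem pvA_enum (info : List String) :
    ∀ (k : Nat) (resp : PySem.Dict String (List String)),
    (PySem.List.enumerate (info.drop k) (k : Int)).foldl
      (fun resp p =>
        if PySem.Str.isIn "port" p.2 then
          pvInnerA info (pvPortName p.2) p.1.toNat [] resp
        else resp) resp = pvGo resp (info.drop k) := by
  suffices H : ∀ (n k : Nat) (resp : PySem.Dict String (List String)), info.length - k = n →
      (PySem.List.enumerate (info.drop k) (k : Int)).foldl
        (fun resp p =>
          if PySem.Str.isIn "port" p.2 then
            pvInnerA info (pvPortName p.2) p.1.toNat [] resp
          else resp) resp = pvGo resp (info.drop k) by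
    intro k resp; exact H _ k resp rfl
  intro n
  induction n with
  | zero =>
      intro k resp hk
      have hnil : info.drop k = [] := List.drop_eq_nil_of_le (by omega)
      simp [hnil, PySem.List.enumerate_nil, pvGo]
  | succ n ih =>
      intro k resp hk
      have hlt : k < info.length := by omega
      rw [List.drop_eq_getElem_cons hlt, PySem.List.enumerate_cons, List.foldl_cons]
      have h1 : ((k : Int) + 1) = ((k + 1 : Nat) : Int) := by push_cast; ring
      rw [h1, ih (k + 1) _ (by omega)]
      rw [pvGo_cons]
      congr 1
      show (if PySem.Str.isIn "port" info[k] then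
              pvInnerA info (pvPortName info[k]) ((k : Int)).toNat [] resp
            else resp) = _
      by_cases hp : PySem.Str.isIn "port" info[k] = true
      · rw [if_pos hp, if_pos hp]
        simp only [Int.toNat_natCast]
        exact pvInnerA_nil_spec info (pvPortName info[k]) k resp
      · rw [if_neg hp, if_neg hp]

theorem pvStepB_port (st : PySem.Dict String (List String) × Option (String × List String))
    (x : String) (hp : PySem.Str.isIn "port" x = true) :
    pvStepB st x = (pvFlushB st.1 st.2, some (pvPortName x, [])) := by
  unfold pvStepB; rw [if_pos hp]

theorem pvStepB_keep (resp : PySem.Dict String (List String)) (p : String) (fs : List String)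
    (x : String) (hp : PySem.Str.isIn "port" x = false)
    (hk : ((!PySem.Str.isIn "ethernet" x) && (!PySem.Str.isIn "exit" x)) = true) :
    pvStepB (resp, some (p, fs)) x = (resp, some (p, fs ++ [PySem.Str.strip x])) := by
  unfold pvStepB
  rw [if_neg (by rw [hp]; exact Bool.false_ne_true)]
  show (if ((!PySem.Str.isIn "ethernet" x) && (!PySem.Str.isIn "exit" x)) = true
        then ((resp : PySem.Dict String (List String)), some (p, fs ++ [PySem.Str.strip x]))
        else (resp, some (p, fs))) = _
  rw [if_pos hk]

theorem pvStepB_skip (resp : PySem.Dict String (List String)) (p : String) (fs : List String)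
    (x : String) (hp : PySem.Str.isIn "port" x = false)
    (hk : ((!PySem.Str.isIn "ethernet" x) && (!PySem.Str.isIn "exit" x)) = false) :
    pvStepB (resp, some (p, fs)) x = (resp, some (p, fs)) := by
  unfold pvStepB
  rw [if_neg (by rw [hp]; exact Bool.false_ne_true)]
  show (if ((!PySem.Str.isIn "ethernet" x) && (!PySem.Str.isIn "exit" x)) = true
        then ((resp : PySem.Dict String (List String)), some (p, fs ++ [PySem.Str.strip x]))
        else (resp, some (p, fs))) = _
  rw [if_neg (by rw [hk]; exact Bool.false_ne_true)]

theorem pvStepB_none (resp : PySem.Dict String (List String))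
    (x : String) (hp : PySem.Str.isIn "port" x = false) :
    pvStepB (resp, none) x = (resp, none) := by
  unfold pvStepB
  rw [if_neg (by rw [hp]; exact Bool.false_ne_true)]

theorem pvFlushB_some (resp : PySem.Dict String (List String)) (p : String) (fs : List String) :
    pvFlushB resp (some (p, fs)) = pvUpd resp p fs := rfl

theorem pvB_some (xs : List String) :
    ∀ (resp : PySem.Dict String (List String)) (p : String) (fs : List String),
    pvFlushB (xs.foldl pvStepB (resp, some (p, fs))).1
             (xs.foldl pvStepB (resp, some (p, fs))).2 =
      pvGo (pvUpd resp p (fs ++ pvCollect xs)) xs := by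
  induction xs with
  | nil => intro resp p fs; simp [pvFlushB_some, pvGo, pvCollect]
  | cons x xs ih =>
      intro resp p fs
      rw [List.foldl_cons]
      by_cases hp : PySem.Str.isIn "port" x = true
      · rw [pvStepB_port _ _ hp, ih, pvGo_cons, if_pos hp, pvCollect_cons_port _ hp]
        rw [pvFlushB_some]
        congr 1
        simp
      · have hp' : PySem.Str.isIn "port" x = false := Bool.eq_false_iff.mpr hp
        by_cases hk : ((!PySem.Str.isIn "ethernet" x) && (!PySem.Str.isIn "exit" x)) = true
        · rw [pvStepB_keep _ _ _ _ hp' hk, ih, pvGo_cons, if_neg hp,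
            pvCollect_cons_keep _ hp' hk]
          congr 1
          simp
        · have hk' : ((!PySem.Str.isIn "ethernet" x) && (!PySem.Str.isIn "exit" x)) = false :=
            Bool.eq_false_iff.mpr hk
          rw [pvStepB_skip _ _ _ _ hp' hk', ih, pvGo_cons, if_neg hp,
            pvCollect_cons_skip _ hp' hk']

theorem pvB_none (xs : List String) :
    ∀ (resp : PySem.Dict String (List String)),
    pvFlushB (xs.foldl pvStepB (resp, none)).1 (xs.foldl pvStepB (resp, none)).2
      = pvGo resp xs := by
  induction xs with
  | nil => intro resp; simp [pvFlushB, pvGo]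
  | cons x xs ih =>
      intro resp
      rw [List.foldl_cons]
      by_cases hp : PySem.Str.isIn "port" x = true
      · rw [pvStepB_port _ _ hp, pvB_some, pvGo_cons, if_pos hp]
        rfl
      · have hp' : PySem.Str.isIn "port" x = false := Bool.eq_false_iff.mpr hp
        rw [pvStepB_none _ _ hp', ih, pvGo_cons, if_neg hp]

-- ===== VERDICT (by name: the statement is the Claim_ definition above) =====
theorem analiza_puertos_spec : Claim_equal_analiza_puertos := by
  intro info _
  unfold Spec_analiza_puertos analiza_puertos analiza_puertos_alt
  have hA := pvA_enum info 0 PySem.Dict.empty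
  simp only [List.drop_zero, Int.natCast_zero] at hA
  rw [hA, pvB_none]
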